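-- pv_equiv track=rewrite | github.com/NisoD/Data_Science_Ex1 | Q7.py | td
-- ===== SOURCE A (Python) =====
-- def td(descriptions, words:list):
--     td_words = {}
--     for word in words:
--         td_word = []
--         for doc in descriptions:
--             td_word.append(doc.count(word))
--         td_words[word] = td_word
--     return td_words
-- ===== SOURCE B (Python) =====
-- def td(descriptions, words: list):
--     # Substring-dictionary multi-pattern scan: dedup the words into a hash map
--     # once and collect the distinct word lengths; then walk each document once,
--     # at each position looking up the substring of each candidate length in the
--     # map -- no per-word loop at all.  A per-word "next allowed start" keeps the
--     # matches non-overlapping, exactly str.count's semantics (the empty word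
--     # occurs len(doc)+1 times).
--     uniq = list(dict.fromkeys(words))
--     lens = sorted({len(w) for w in uniq if w})
--     res = {w: [] for w in uniq}
--     for doc in descriptions:
--         L = len(doc)
--         st = dict.fromkeys(uniq, (0, 0))    # word -> (count, next allowed start)
--         for i in range(L):
--             for m in lens:
--                 if i + m <= L:
--                     sub = doc[i:i + m]
--                     p = st.get(sub)
--                     if p is not None:
--                         c, nx = p
--                         if nx <= i:
--                             st[sub] = (c + 1, i + m)
--         for w in uniq:
--             res[w].append(st[w][0] if w else L + 1)
--     return res
-- ===== Notes on version B (the rewrite author's own statement) =====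
-- stated objective: alternative
-- what changed: B replaces the per-(word,doc) builtin substring count with a substring-dictionary multi-pattern scan: the words are deduplicated into a hash map once, and each document is walked once, looking up the substring of each distinct word length at every position, with a per-word next-allowed-start enforcing str.count's non-overlapping semantics.
import Mathlib
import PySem

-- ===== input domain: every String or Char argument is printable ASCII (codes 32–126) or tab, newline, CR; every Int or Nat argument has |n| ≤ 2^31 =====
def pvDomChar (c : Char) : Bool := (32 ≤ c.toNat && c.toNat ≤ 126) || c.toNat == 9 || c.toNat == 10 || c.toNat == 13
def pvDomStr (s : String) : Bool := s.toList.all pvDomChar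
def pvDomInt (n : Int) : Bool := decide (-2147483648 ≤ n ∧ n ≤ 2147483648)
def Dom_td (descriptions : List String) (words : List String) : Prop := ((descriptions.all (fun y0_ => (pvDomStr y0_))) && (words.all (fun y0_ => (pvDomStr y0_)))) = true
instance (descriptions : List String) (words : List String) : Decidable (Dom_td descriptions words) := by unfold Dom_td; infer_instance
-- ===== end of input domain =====

-- B replaces per-(word,doc) builtin substring counting with a substring-dictionary multi-pattern
-- scan: the words are deduplicated into a hash map once, each document is walked once trying only
-- the distinct word lengths at each position, and a per-word next-allowed-start makes matches
-- non-overlapping, like str.count; equal return value; alternative algorithm.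


-- ===== PORT A =====
def td (descriptions : List String) (words : List String) : List (String × List Int) :=
  (words.foldl (fun td_words word =>
      td_words.insert word
        (descriptions.foldl (fun td_word doc => td_word ++ [(PySem.Str.count doc word : Int)]) []))
    PySem.Dict.empty).items

-- ===== PORT B =====
def td_alt (descriptions : List String) (words : List String) : List (String × List Int) :=
  let uniq := PySem.List.dedup words
  let lens : List Int :=
    PySem.List.sorted (PySem.Set.ofList ((uniq.filter (fun w => w != "")).map PySem.Str.len))
      (fun x => x)
  let res0 : PySem.Dict String (List Int) :=
    uniq.foldl (fun d w => d.insert w ([] : List Int)) PySem.Dict.empty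
  (descriptions.foldl (fun res doc =>
      let L := PySem.Str.len doc
      let st : PySem.Dict String (Int × Int) :=
        (PySem.List.pyRange 0 L 1).foldl (fun st i =>
          lens.foldl (fun st m =>
            if i + m ≤ L then
              -- doc[i:i+m]: Python slicing, exact via PySem.Str.slice
              let sub := PySem.Str.slice doc (some i) (some (i + m))
              match st.get? sub with
              | none => st
              | some p => if p.2 ≤ i then st.insert sub (p.1 + 1, i + m) else st
            else st) st)
          (uniq.foldl (fun d w => d.insert w ((0 : Int), (0 : Int))) PySem.Dict.empty)
      uniq.foldl (fun r w => r.modify w []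
        (fun l => l ++ [if w = "" then L + 1 else (st.getD w (0, 0)).1])) res)
    res0).items

-- ===== PRECONDITION & SPEC =====
def Spec_td (descriptions : List String) (words : List String) (out : List (String × List Int)) : Prop := out = td_alt descriptions words
instance (descriptions : List String) (words : List String) (out : List (String × List Int)) : Decidable (Spec_td descriptions words out) := by unfold Spec_td; infer_instance

-- ===== CLAIM (what is proved, stated in full; the proofs are below) =====
def Claim_equal_td : Prop := ∀ (descriptions : List String) (words : List String), Dom_td descriptions words → Spec_td descriptions words (td descriptions words)

-- ===== LEMMAS AND PROOFS =====

-- ---- core: the greedy position scan computes Python's non-overlapping substring count ----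

-- skip step of the scan for one word, at Nat position k, on the char lists of doc and word
def pvStep (cs wc : List Char) (p : Int × Int) (k : Nat) : Int × Int :=
  if p.2 ≤ (k : Int) ∧ wc <+: cs.drop k then
    (p.1 + 1, (k : Int) + (if wc.length = 0 then 1 else (wc.length : Int)))
  else p

-- positions strictly below the stored next-allowed-start leave the state unchanged
theorem pv_skip (cs wc : List Char) :
    ∀ (b a : Nat) (p : Int × Int), ((a + b : Nat) : Int) ≤ p.2 →
      (List.range' a b).foldl (pvStep cs wc) p = p := by
  intro b
  induction b with
  | zero => intro a p _; rfl
  | succ b ih =>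
    intro a p h
    have ha : ¬ (p.2 ≤ (a : Int)) := by push_cast at h ⊢; omega
    simp only [List.range'_succ, List.foldl_cons, pvStep, ha, false_and, if_false]
    exact ih (a + 1) p (by push_cast at h ⊢; omega)

-- count.go carries its accumulator additively
theorem pv_go_acc (wc : List Char) :
    ∀ (f : Nat) (l : List Char) (acc : Nat),
      PySem.Chars.count.go wc f l acc = acc + PySem.Chars.count.go wc f l 0 := by
  intro f
  induction f with
  | zero => intro l acc; cases l <;> rfl
  | succ f ih =>
    intro l acc
    cases l with
    | nil => rfl
    | cons h t =>
      show (if wc.isPrefixOf (h :: t) then _ else _) = acc + (if wc.isPrefixOf (h :: t) then _ else _)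
      split_ifs with hp
      · rw [ih _ (acc + 1), ih _ (0 + 1)]; omega
      · exact ih t acc

-- count.go ignores fuel beyond the list length (for a nonempty pattern)
theorem pv_go_fuel (wc : List Char) (hw : wc ≠ []) :
    ∀ (f g : Nat) (l : List Char) (acc : Nat), l.length ≤ f → l.length ≤ g →
      PySem.Chars.count.go wc f l acc = PySem.Chars.count.go wc g l acc := by
  intro f
  induction f with
  | zero =>
    intro g l acc hf _
    have : l = [] := List.eq_nil_of_length_eq_zero (Nat.le_zero.mp hf)
    subst this
    cases g <;> rfl
  | succ f ih =>
    intro g l acc hf hg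
    cases l with
    | nil => cases g <;> rfl
    | cons h t =>
      cases g with
      | zero => simp at hg
      | succ g =>
        have hwl : 1 ≤ wc.length := by
          cases wc with | nil => exact absurd rfl hw | cons _ _ => simp
        show (if wc.isPrefixOf (h :: t) then _ else _) = (if wc.isPrefixOf (h :: t) then _ else _)
        split_ifs with hp
        · exact ih g _ _ (by simp at hf ⊢; omega) (by simp at hg ⊢; omega)
        · exact ih g t acc (by simp at hf ⊢; omega) (by simp at hg ⊢; omega)

-- definitional unfolding of count.go on a positive fuel and a cons list
theorem pv_go_cons (sub : List Char) (f acc : Nat) (h : Char) (t : List Char) :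
    PySem.Chars.count.go sub (f + 1) (h :: t) acc =
      if sub.isPrefixOf (h :: t) then
        PySem.Chars.count.go sub f ((h :: t).drop sub.length) (acc + 1)
      else PySem.Chars.count.go sub f t acc := rfl

-- main invariant of the scan for a nonempty word: scanning positions k…len(doc) with
-- next-start ≤ k counts exactly the greedy (non-overlapping) matches in cs.drop k
theorem pv_main (cs wc : List Char) (hw : wc ≠ []) :
    ∀ (d : Nat), ∀ (k : Nat) (c nxt : Int), k + d = cs.length + 1 → nxt ≤ (k : Int) →
      ((List.range' k d).foldl (pvStep cs wc) (c, nxt)).1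
        = c + (PySem.Chars.count.go wc (cs.drop k).length (cs.drop k) 0 : Int) := by
  intro d
  induction d using Nat.strong_induction_on with
  | _ d ih =>
    match d with
    | 0 =>
      intro k c nxt hk hn
      have hdrop : cs.drop k = [] := List.drop_eq_nil_of_le (by omega)
      simp [hdrop, show PySem.Chars.count.go wc 0 [] 0 = 0 from rfl]
    | e + 1 =>
      intro k c nxt hk hn
      have hwl : 1 ≤ wc.length := by
        cases wc with | nil => exact absurd rfl hw | cons _ _ => simp
      rw [List.range'_succ, List.foldl_cons]
      by_cases hp : wc <+: cs.drop k
      · -- the word matches at position k: count it and skip its span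
        have hfit : wc.length ≤ (cs.drop k).length := hp.length_le
        have hwe : wc.length ≤ e := by rw [List.length_drop] at hfit; omega
        have hcond : (c, nxt).2 ≤ (k : Int) ∧ wc <+: cs.drop k := ⟨hn, hp⟩
        simp only [pvStep, if_pos hcond]
        rw [if_neg (by omega : ¬ (wc.length = 0))]
        have he : e = (wc.length - 1) + (e - (wc.length - 1)) := by omega
        rw [he, ← List.range'_append, List.foldl_append]
        rw [pv_skip cs wc (wc.length - 1) (k + 1)
            ((c + 1 : Int), (k : Int) + (wc.length : Int)) (by push_cast; omega)]
        rw [show k + 1 + 1 * (wc.length - 1) = k + wc.length by omega]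
        rw [ih (e - (wc.length - 1)) (by omega) (k + wc.length) (c + 1)
            ((k : Int) + (wc.length : Int)) (by omega) (by push_cast; omega)]
        have hkm : k < cs.length := by omega
        have hdk : cs.drop k = cs[k] :: cs.drop (k + 1) := List.drop_eq_getElem_cons hkm
        have hpre : wc.isPrefixOf (cs.drop k) = true := List.isPrefixOf_iff_prefix.mpr hp
        have hgo : PySem.Chars.count.go wc (cs.drop k).length (cs.drop k) 0
            = 1 + PySem.Chars.count.go wc (cs.drop (k + wc.length)).length
                    (cs.drop (k + wc.length)) 0 := by
          rw [show (cs.drop k).length = (cs.length - k - 1) + 1 by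
            rw [List.length_drop]; omega]
          conv_lhs => rw [hdk]
          rw [pv_go_cons, ← hdk, if_pos hpre, List.drop_drop, Nat.zero_add, pv_go_acc]
          rw [pv_go_fuel wc hw (cs.length - k - 1) (cs.drop (k + wc.length)).length _ 0
            (by rw [List.length_drop]; omega) (le_refl _)]
        rw [hgo]
        push_cast
        ring
      · -- no match at position k: the state is unchanged
        have hcond : ¬ ((c, nxt).2 ≤ (k : Int) ∧ wc <+: cs.drop k) := fun h => hp h.2
        simp only [pvStep, if_neg hcond]
        rw [ih e (by omega) (k + 1) c nxt (by omega) (by push_cast; omega)]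
        congr 2
        symm
        by_cases hkm : k < cs.length
        · have hdk : cs.drop k = cs[k] :: cs.drop (k + 1) := List.drop_eq_getElem_cons hkm
          rw [show (cs.drop k).length = (cs.length - k - 1) + 1 by
            rw [List.length_drop]; omega]
          conv_lhs => rw [hdk]
          rw [pv_go_cons, ← hdk,
            if_neg (by rw [List.isPrefixOf_iff_prefix]; exact hp)]
          exact pv_go_fuel wc hw (cs.length - k - 1) (cs.drop (k + 1)).length _ 0
            (by rw [List.length_drop]; omega) (le_refl _)
        · rw [List.drop_eq_nil_of_le (as := cs) (by omega : cs.length ≤ k),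
            List.drop_eq_nil_of_le (as := cs) (by omega : cs.length ≤ k + 1)]

-- the full scan over the positions 0 … len-1 computes Chars.count (nonempty word:
-- the extra position len of a full range scan could never match anyway)
theorem pv_scan_count (cs wc : List Char) (hw : wc ≠ []) :
    ((List.range cs.length).foldl (pvStep cs wc) (0, 0)).1
      = (PySem.Chars.count cs wc : Int) := by
  have hlast : (List.range (cs.length + 1)).foldl (pvStep cs wc) (0, 0)
      = (List.range cs.length).foldl (pvStep cs wc) (0, 0) := by
    rw [List.range_succ, List.foldl_append, List.foldl_cons, List.foldl_nil]
    show pvStep cs wc _ cs.length = _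
    unfold pvStep
    rw [if_neg]
    rintro ⟨-, hpre⟩
    rw [List.drop_length] at hpre
    exact hw (List.prefix_nil.mp hpre)
  rw [← hlast, List.range_eq_range']
  have := pv_main cs wc hw (cs.length + 1) 0 0 0 (by omega) (by simp)
  simp only [List.drop_zero] at this
  rw [this]
  simp only [PySem.Chars.count, List.isEmpty_iff]
  rw [if_neg hw]
  ring

-- pyRange over a Nat bound is the cast of List.range
theorem pv_pyRange (m : Nat) :
    PySem.List.pyRange 0 (m : Int) 1 = List.map (fun k : Nat => (k : Int)) (List.range m) := by
  rw [PySem.List.pyRange_of_pos _ _ (by norm_num)]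
  by_cases hm : m = 0
  · subst hm; simp
  · rw [if_pos (by omega)]
    have h1 : ((m : Int) - 0 + 1 - 1) / 1 = (m : Int) := by simp
    rw [h1, Int.toNat_natCast]
    apply List.map_congr_left
    intro k _
    ring

-- ---- dict plumbing ----

-- A's outer loop: repeatedly inserting w ↦ F w (a value independent of the dict) yields the
-- deduplicated key list, each mapped to F.
theorem foldl_insert_fun (F : String → List Int) (ws : List String) :
    ∀ (seen : PySem.Set String), seen.Nodup →
      (ws.foldl (fun d w => d.insert w (F w))
        (PySem.Dict.mk (seen.map (fun w => (w, F w))))).items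
      = (PySem.Set.update seen ws).map (fun w => (w, F w)) := by
  induction ws with
  | nil => intro seen _; rfl
  | cons w ws ih =>
    intro seen hnd
    have hkeys : (PySem.Dict.mk (seen.map (fun w => (w, F w)))).keys = seen := by
      simp [PySem.Dict.keys, Function.comp_def]
    by_cases hm : w ∈ seen
    · have hc : (PySem.Dict.mk (seen.map (fun w => (w, F w)))).contains w = true := by
        rw [PySem.Dict.contains_iff_mem_keys, hkeys]; exact hm
      have hins : (PySem.Dict.mk (seen.map (fun w => (w, F w)))).insert w (F w)
          = PySem.Dict.mk (seen.map (fun w => (w, F w))) := by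
        apply PySem.Dict.ext
        rw [PySem.Dict.items_insert_of_contains _ _ hc]
        show (seen.map (fun w => (w, F w))).map _ = _
        rw [List.map_map]
        apply List.map_congr_left
        intro x _
        by_cases hx : x = w <;> simp [hx]
      have hadd : PySem.Set.add seen w = seen := by simp [PySem.Set.add, PySem.Set.contains, hm]
      simp only [List.foldl_cons, hins, PySem.Set.update, List.foldl_cons, hadd]
      exact ih seen hnd
    · have hc : (PySem.Dict.mk (seen.map (fun w => (w, F w)))).contains w = false := by
        rw [Bool.eq_false_iff, Ne, PySem.Dict.contains_iff_mem_keys, hkeys]; exact hm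
      have hins : (PySem.Dict.mk (seen.map (fun w => (w, F w)))).insert w (F w)
          = PySem.Dict.mk ((seen ++ [w]).map (fun w => (w, F w))) := by
        apply PySem.Dict.ext
        rw [PySem.Dict.items_insert_of_not_contains _ _ hc]
        simp
      have hadd : PySem.Set.add seen w = seen ++ [w] := by
        simp [PySem.Set.add, PySem.Set.contains, hm]
      simp only [List.foldl_cons, hins, PySem.Set.update, List.foldl_cons, hadd]
      exact ih (seen ++ [w]) (by
        simp only [List.nodup_append, List.nodup_singleton, true_and]
        exact ⟨hnd, by intro a ha b hb; simp at hb; exact fun h => hm ((h.trans hb) ▸ ha)⟩)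

-- one inner pass over the candidate lengths at one position updates each key's entry
-- independently: the only key a length m can touch is the length-m substring at that position
theorem dict_slice_pass (uniq : List String) (hnd : uniq.Nodup) (doc : String) (i L : Int) :
    ∀ (ms : List Int) (g : String → Int × Int),
      ms.foldl (fun st m =>
        if i + m ≤ L then
          match st.get? (PySem.Str.slice doc (some i) (some (i + m))) with
          | none => st
          | some p => if p.2 ≤ i then
              st.insert (PySem.Str.slice doc (some i) (some (i + m))) (p.1 + 1, i + m)
            else st
        else st) (PySem.Dict.mk (uniq.map (fun x => (x, g x))))
      = PySem.Dict.mk (uniq.map (fun x =>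
          (x, ms.foldl (fun p m =>
            if i + m ≤ L ∧ x = PySem.Str.slice doc (some i) (some (i + m)) then
              (if p.2 ≤ i then (p.1 + 1, i + m) else p)
            else p) (g x)))) := by
  intro ms
  induction ms with
  | nil => intro g; simp
  | cons m ms ih =>
    intro g
    simp only [List.foldl_cons]
    have hkeys : ∀ (g' : String → Int × Int),
        (PySem.Dict.mk (uniq.map (fun x => (x, g' x)))).keys = uniq := by
      intro g'; simp [PySem.Dict.keys, Function.comp_def]
    by_cases hL : i + m ≤ L
    · by_cases hsub : PySem.Str.slice doc (some i) (some (i + m)) ∈ uniq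
      · have hget : (PySem.Dict.mk (uniq.map (fun x => (x, g x)))).get?
            (PySem.Str.slice doc (some i) (some (i + m)))
            = some (g (PySem.Str.slice doc (some i) (some (i + m)))) :=
          PySem.Dict.get?_of_mem_items _ (List.mem_map.mpr ⟨_, hsub, rfl⟩)
            (by rw [hkeys]; exact hnd)
        rw [if_pos hL]
        simp only [hget]
        by_cases hcond : (g (PySem.Str.slice doc (some i) (some (i + m)))).2 ≤ i
        · rw [if_pos hcond]
          have hc : (PySem.Dict.mk (uniq.map (fun x => (x, g x)))).contains
              (PySem.Str.slice doc (some i) (some (i + m))) = true := by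
            rw [PySem.Dict.contains_iff_mem_keys, hkeys]; exact hsub
          have hins : (PySem.Dict.mk (uniq.map (fun x => (x, g x)))).insert
              (PySem.Str.slice doc (some i) (some (i + m)))
              ((g (PySem.Str.slice doc (some i) (some (i + m)))).1 + 1, i + m)
              = PySem.Dict.mk (uniq.map (fun x =>
                  (x, if x = PySem.Str.slice doc (some i) (some (i + m)) then
                    ((g x).1 + 1, i + m) else g x))) := by
            apply PySem.Dict.ext
            rw [PySem.Dict.items_insert_of_contains _ _ hc]
            show (uniq.map (fun x => (x, g x))).map _ = _
            rw [List.map_map]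
            apply List.map_congr_left
            intro x _
            by_cases hx : x = PySem.Str.slice doc (some i) (some (i + m))
            · subst hx; simp
            · simp [hx]
          rw [hins, ih]
          congr 1
          apply List.map_congr_left
          intro x _
          by_cases hx : x = PySem.Str.slice doc (some i) (some (i + m))
          · subst hx
            have hcc : i + m ≤ L ∧ PySem.Str.slice doc (some i) (some (i + m))
                = PySem.Str.slice doc (some i) (some (i + m)) := ⟨hL, rfl⟩
            rw [if_pos hcc, if_pos hcond]
            simp
          · rw [if_neg hx, if_neg (show ¬(i + m ≤ L ∧ x = PySem.Str.slice doc (some i) (some (i + m))) from fun hc' => hx hc'.2)]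
        · rw [if_neg hcond, ih]
          congr 1
          apply List.map_congr_left
          intro x _
          by_cases hx : x = PySem.Str.slice doc (some i) (some (i + m))
          · subst hx
            have hcc : i + m ≤ L ∧ PySem.Str.slice doc (some i) (some (i + m))
                = PySem.Str.slice doc (some i) (some (i + m)) := ⟨hL, rfl⟩
            rw [if_pos hcc, if_neg hcond]
          · rw [if_neg (show ¬(i + m ≤ L ∧ x = PySem.Str.slice doc (some i) (some (i + m))) from fun hc' => hx hc'.2)]
      · have hget : (PySem.Dict.mk (uniq.map (fun x => (x, g x)))).get?
            (PySem.Str.slice doc (some i) (some (i + m))) = none := by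
          rw [PySem.Dict.get?_eq_none_iff_not_mem_keys, hkeys]; exact hsub
        rw [if_pos hL]
        simp only [hget]
        rw [ih]
        congr 1
        apply List.map_congr_left
        intro x hx
        rw [if_neg (show ¬(i + m ≤ L ∧ x = PySem.Str.slice doc (some i) (some (i + m))) from fun hc' => hsub (hc'.2 ▸ hx))]
    · rw [if_neg hL, ih]
      congr 1
      apply List.map_congr_left
      intro x _
      rw [if_neg (show ¬(i + m ≤ L ∧ x = PySem.Str.slice doc (some i) (some (i + m))) from fun hc' => hL hc'.1)]

-- folding the inner pass over the positions scans each key's entry independently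
theorem dict_slice_fold (uniq : List String) (hnd : uniq.Nodup) (doc : String) (L : Int)
    (ms : List Int) :
    ∀ (js : List Int) (g : String → Int × Int),
      js.foldl (fun st i => ms.foldl (fun st m =>
        if i + m ≤ L then
          match st.get? (PySem.Str.slice doc (some i) (some (i + m))) with
          | none => st
          | some p => if p.2 ≤ i then
              st.insert (PySem.Str.slice doc (some i) (some (i + m))) (p.1 + 1, i + m)
            else st
        else st) st)
        (PySem.Dict.mk (uniq.map (fun x => (x, g x))))
      = PySem.Dict.mk (uniq.map (fun x =>
          (x, js.foldl (fun p i => ms.foldl (fun p m =>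
            if i + m ≤ L ∧ x = PySem.Str.slice doc (some i) (some (i + m)) then
              (if p.2 ≤ i then (p.1 + 1, i + m) else p)
            else p) p) (g x)))) := by
  intro js
  induction js with
  | nil => intro g; simp
  | cons j js ih =>
    intro g
    simp only [List.foldl_cons]
    rw [dict_slice_pass uniq hnd doc j L ms g]
    exact ih (fun x => ms.foldl (fun p m =>
      if j + m ≤ L ∧ x = PySem.Str.slice doc (some j) (some (j + m)) then
        (if p.2 ≤ j then (p.1 + 1, j + m) else p)
      else p) (g x))

-- B's result loop: one modify-append pass over the (duplicate-free) key list appends one count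
-- to every column.
theorem inner_pass (uniq : List String) (hnd : uniq.Nodup) (c : String → Int)
    (g : String → List Int) :
    ∀ (us : List String), us.Nodup → (∀ u ∈ us, u ∈ uniq) →
      us.foldl (fun d w => d.modify w [] (fun l => l ++ [c w]))
        (PySem.Dict.mk (uniq.map (fun x => (x, g x))))
      = PySem.Dict.mk (uniq.map (fun x =>
          (x, if x ∈ us then g x ++ [c x] else g x))) := by
  intro us
  induction us generalizing g with
  | nil => intro _ _; simp
  | cons w us ih =>
    intro hndu hsub
    have hw : w ∈ uniq := hsub w (List.mem_cons_self ..)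
    have hkeys : (PySem.Dict.mk (uniq.map (fun x => (x, g x)))).keys = uniq := by
      simp [PySem.Dict.keys, Function.comp_def]
    have hknd : (PySem.Dict.mk (uniq.map (fun x => (x, g x)))).keys.Nodup := by
      rw [hkeys]; exact hnd
    have hmem : (w, g w) ∈ uniq.map (fun x => (x, g x)) := List.mem_map.mpr ⟨w, hw, rfl⟩
    have hgd : (PySem.Dict.mk (uniq.map (fun x => (x, g x)))).getD w [] = g w :=
      PySem.Dict.getD_of_mem_items _ hmem hknd []
    have hc : (PySem.Dict.mk (uniq.map (fun x => (x, g x)))).contains w = true := by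
      rw [PySem.Dict.contains_iff_mem_keys, hkeys]; exact hw
    have hmod : (PySem.Dict.mk (uniq.map (fun x => (x, g x)))).modify w [] (fun l => l ++ [c w])
        = PySem.Dict.mk (uniq.map (fun x =>
            (x, if x = w then g x ++ [c x] else g x))) := by
      show (PySem.Dict.mk (uniq.map (fun x => (x, g x)))).insert w _ = _
      rw [hgd]
      apply PySem.Dict.ext
      rw [PySem.Dict.items_insert_of_contains _ _ hc]
      show (uniq.map (fun x => (x, g x))).map _ = _
      rw [List.map_map]
      apply List.map_congr_left
      intro x _
      by_cases hx : x = w <;> simp [hx]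
    simp only [List.foldl_cons, hmod]
    rw [ih (fun x => if x = w then g x ++ [c x] else g x)
          (List.nodup_cons.mp hndu).2 (fun u hu => hsub u (List.mem_cons_of_mem _ hu))]
    congr 1
    apply List.map_congr_left
    intro x _
    have hwus : w ∉ us := (List.nodup_cons.mp hndu).1
    by_cases hx : x = w
    · subst hx
      simp [hwus, List.mem_cons]
    · by_cases hxu : x ∈ us <;> simp [hx, hxu, List.mem_cons]

-- B's outer loop invariant: after the documents ds, every column x holds g x ++ per-doc values.
theorem outer_pass (uniq : List String) (hnd : uniq.Nodup) (cf : String → String → Int) :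
    ∀ (ds : List String) (g : String → List Int),
      ds.foldl (fun d doc =>
          uniq.foldl (fun d w => d.modify w [] (fun l => l ++ [cf doc w])) d)
        (PySem.Dict.mk (uniq.map (fun x => (x, g x))))
      = PySem.Dict.mk (uniq.map (fun x =>
          (x, g x ++ ds.map (fun doc => cf doc x)))) := by
  intro ds
  induction ds with
  | nil => intro g; simp
  | cons doc ds ih =>
    intro g
    simp only [List.foldl_cons]
    rw [inner_pass uniq hnd (fun w => cf doc w) g uniq hnd (fun u hu => hu)]
    have := ih (fun x => if x ∈ uniq then g x ++ [cf doc x] else g x)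
    rw [this]
    congr 1
    apply List.map_congr_left
    intro x hx
    simp [hx]

-- proof-side name for the port's distinct-word-length list (definitionally the port's `lens`)
def pvLens (uniq : List String) : List Int :=
  PySem.List.sorted (PySem.Set.ofList ((uniq.filter (fun w => w != "")).map PySem.Str.len))
    (fun x => x)

theorem mem_pvLens (uniq : List String) (m : Int) :
    m ∈ pvLens uniq ↔ ∃ w ∈ uniq, w ≠ "" ∧ PySem.Str.len w = m := by
  rw [pvLens, PySem.List.mem_sorted, PySem.Set.mem_ofList]
  simp only [List.mem_map, List.mem_filter, bne_iff_ne, ne_eq]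
  exact ⟨fun ⟨a, ⟨h1, h2⟩, h3⟩ => ⟨a, h1, h2, h3⟩, fun ⟨a, h1, h2, h3⟩ => ⟨a, ⟨h1, h2⟩, h3⟩⟩

theorem nodup_pvLens (uniq : List String) : (pvLens uniq).Nodup :=
  (PySem.List.sorted_perm _ _ _).symm.nodup (PySem.Set.nodup_ofList _)

-- a fold whose steps are all no-ops is the identity
theorem foldl_noop {α β : Type} (f : β → α → β) :
    ∀ (ms : List α) (acc : β), (∀ m ∈ ms, ∀ p, f p m = p) → ms.foldl f acc = acc := by
  intro ms
  induction ms with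
  | nil => intro acc _; rfl
  | cons m ms ih =>
    intro acc h
    rw [List.foldl_cons, h m (List.mem_cons_self ..), ih acc (fun m' hm' => h m' (List.mem_cons_of_mem _ hm'))]

-- a fold over a duplicate-free list where every element but one is a no-op is that one step
theorem foldl_single {α β : Type} [DecidableEq α] (f : β → α → β) (m₀ : α) :
    ∀ (ms : List α) (acc : β), ms.Nodup → m₀ ∈ ms →
      (∀ m ∈ ms, m ≠ m₀ → ∀ p, f p m = p) → ms.foldl f acc = f acc m₀ := by
  intro ms
  induction ms with
  | nil => intro acc _ h; simp at h
  | cons m ms ih =>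
    intro acc hnd hm h
    rw [List.foldl_cons]
    by_cases hm0 : m = m₀
    · subst hm0
      rw [foldl_noop f ms (f acc m)
        (fun m' hm' p => h m' (List.mem_cons_of_mem _ hm')
          (fun he => (List.nodup_cons.mp hnd).1 (he ▸ hm')) p)]
    · rw [h m (List.mem_cons_self ..) hm0]
      exact ih acc (List.nodup_cons.mp hnd).2
        ((List.mem_cons.mp hm).resolve_left (fun he => hm0 he.symm))
        (fun m' hm' => h m' (List.mem_cons_of_mem _ hm'))

-- the per-word projection of the scan: at each position, trying every candidate length and
-- comparing the substring is exactly one greedy pvStep for that word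
theorem pv_slice_scan (uniq : List String) (doc x : String) (hx : x ∈ uniq) (hne : x ≠ "") :
    ((PySem.List.pyRange 0 (PySem.Str.len doc) 1).foldl (fun p i =>
        (pvLens uniq).foldl (fun p m =>
          if i + m ≤ PySem.Str.len doc ∧ x = PySem.Str.slice doc (some i) (some (i + m)) then
            (if p.2 ≤ i then (p.1 + 1, i + m) else p)
          else p) p) ((0 : Int), (0 : Int))).1
      = (PySem.Str.count doc x : Int) := by
  have hxc : x.toList ≠ [] := by
    intro h
    exact hne (String.toList_inj.mp (by simp [h]))
  have hlen0 : x.toList.length ≠ 0 := fun h => hxc (List.eq_nil_of_length_eq_zero h)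
  rw [PySem.Str.count_eq]
  rw [show PySem.Str.len doc = (doc.toList.length : Int) from rfl, pv_pyRange, List.foldl_map]
  have hstep : ∀ (acc : Int × Int), ∀ k ∈ List.range doc.toList.length,
      (fun (p : Int × Int) (i : Int) =>
        (pvLens uniq).foldl (fun p m =>
          if i + m ≤ (doc.toList.length : Int) ∧ x = PySem.Str.slice doc (some i) (some (i + m)) then
            (if p.2 ≤ i then (p.1 + 1, i + m) else p)
          else p) p) acc ((k : Nat) : Int)
      = pvStep doc.toList x.toList acc k := by
    intro acc k hk
    have hklt : k < doc.toList.length := List.mem_range.mp hk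
    have hmem : (x.toList.length : Int) ∈ pvLens uniq :=
      (mem_pvLens uniq _).mpr ⟨x, hx, hne, rfl⟩
    -- every length other than x's own is a no-op for x
    have hnoop : ∀ m ∈ pvLens uniq, m ≠ (x.toList.length : Int) → ∀ (p : Int × Int),
        (if (k : Int) + m ≤ (doc.toList.length : Int) ∧
            x = PySem.Str.slice doc (some (k : Int)) (some ((k : Int) + m)) then
          (if p.2 ≤ (k : Int) then (p.1 + 1, (k : Int) + m) else p)
        else p) = p := by
      intro m hm hm0 p
      rw [if_neg]
      rintro ⟨hL, hxeq⟩
      obtain ⟨w', _, _, hml⟩ := (mem_pvLens uniq m).mp hm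
      have hmn : m = (w'.toList.length : Int) := hml.symm
      subst hmn
      have hL' : k + w'.toList.length ≤ doc.toList.length := by exact_mod_cast hL
      have hxl : x.toList = List.take w'.toList.length (List.drop k doc.toList) := by
        have := congrArg String.toList hxeq
        rwa [PySem.Str.toList_slice, PySem.Chars.slice_eq_listSlice,
          PySem.List.slice_natCast_add] at this
      apply hm0
      have : x.toList.length = w'.toList.length := by
        rw [hxl, List.length_take, List.length_drop]
        omega
      rw [this]
    beta_reduce
    rw [foldl_single _ _ _ acc (nodup_pvLens uniq) hmem hnoop]
    -- the surviving step is pvStep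
    have hiff : ((k : Int) + (x.toList.length : Int) ≤ (doc.toList.length : Int) ∧
        x = PySem.Str.slice doc (some (k : Int)) (some ((k : Int) + (x.toList.length : Int))))
        ↔ x.toList <+: doc.toList.drop k := by
      constructor
      · rintro ⟨hL, hxeq⟩
        have hxl : x.toList = List.take x.toList.length (List.drop k doc.toList) := by
          have := congrArg String.toList hxeq
          rwa [PySem.Str.toList_slice, PySem.Chars.slice_eq_listSlice,
            PySem.List.slice_natCast_add] at this
        exact List.prefix_iff_eq_take.mpr hxl
      · intro hp
        have hL' : x.toList.length ≤ doc.toList.length - k := by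
          have := hp.length_le
          rwa [List.length_drop] at this
        refine ⟨by omega, ?_⟩
        apply (String.toList_inj).mp
        rw [PySem.Str.toList_slice, PySem.Chars.slice_eq_listSlice,
          PySem.List.slice_natCast_add]
        exact List.prefix_iff_eq_take.mp hp
    by_cases hpre : x.toList <+: doc.toList.drop k
    · rw [if_pos (hiff.mpr hpre)]
      by_cases hple : acc.2 ≤ (k : Int)
      · rw [if_pos hple]
        simp only [pvStep]
        rw [if_pos ⟨hple, hpre⟩, if_neg hlen0]
      · rw [if_neg hple]
        simp only [pvStep]
        rw [if_neg (fun h => hple h.1)]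
    · rw [if_neg (fun h => hpre (hiff.mp h))]
      simp only [pvStep]
      rw [if_neg (fun h => hpre h.2)]
  rw [PySem.List.foldl_congr_mem _ _ (pvStep doc.toList x.toList) _ hstep]
  exact pv_scan_count doc.toList x.toList hxc

-- proof-side name for the port's per-document scan dictionary (definitionally the port's `st`)
def pvS (uniq : List String) (doc : String) : PySem.Dict String (Int × Int) :=
  (PySem.List.pyRange 0 (PySem.Str.len doc) 1).foldl (fun st i =>
    (pvLens uniq).foldl (fun st m =>
      if i + m ≤ PySem.Str.len doc then
        match st.get? (PySem.Str.slice doc (some i) (some (i + m))) with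
        | none => st
        | some p => if p.2 ≤ i then
            st.insert (PySem.Str.slice doc (some i) (some (i + m))) (p.1 + 1, i + m)
          else st
      else st) st)
    (uniq.foldl (fun d w => d.insert w ((0 : Int), (0 : Int))) PySem.Dict.empty)

-- the scan dictionary holds Python's substring count for every nonempty key
theorem pvS_getD (uniq : List String) (hnd : uniq.Nodup) (doc w : String) (hw : w ∈ uniq)
    (hne : w ≠ "") :
    ((pvS uniq doc).getD w (0, 0)).1 = (PySem.Str.count doc w : Int) := by
  have hinit : uniq.foldl (fun d w => d.insert w ((0 : Int), (0 : Int))) PySem.Dict.empty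
      = PySem.Dict.mk (uniq.map (fun x => (x, ((0 : Int), (0 : Int))))) := by
    apply PySem.Dict.ext
    rw [PySem.Dict.items_foldl_insert_fresh (k := fun w => w) _ _ _
        (by intro a _; rfl) (by simpa using hnd)]
    simp [PySem.Dict.empty]
  have hS : pvS uniq doc = PySem.Dict.mk (uniq.map (fun x =>
      (x, (PySem.List.pyRange 0 (PySem.Str.len doc) 1).foldl (fun p i =>
        (pvLens uniq).foldl (fun p m =>
          if i + m ≤ PySem.Str.len doc ∧ x = PySem.Str.slice doc (some i) (some (i + m)) then
            (if p.2 ≤ i then (p.1 + 1, i + m) else p)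
          else p) p) ((0 : Int), (0 : Int))))) := by
    rw [pvS, hinit]
    exact dict_slice_fold uniq hnd doc (PySem.Str.len doc) (pvLens uniq)
      (PySem.List.pyRange 0 (PySem.Str.len doc) 1) (fun _ => ((0 : Int), (0 : Int)))
  rw [hS]
  set G : String → Int × Int := fun x =>
    (PySem.List.pyRange 0 (PySem.Str.len doc) 1).foldl (fun p i =>
      (pvLens uniq).foldl (fun p m =>
        if i + m ≤ PySem.Str.len doc ∧ x = PySem.Str.slice doc (some i) (some (i + m)) then
          (if p.2 ≤ i then (p.1 + 1, i + m) else p)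
        else p) p) ((0 : Int), (0 : Int)) with hG
  have hkeys : (PySem.Dict.mk (uniq.map (fun x => (x, G x)))).keys = uniq := by
    simp [PySem.Dict.keys, Function.comp_def]
  have hmem : (w, G w) ∈ uniq.map (fun x => (x, G x)) := List.mem_map.mpr ⟨w, hw, rfl⟩
  rw [PySem.Dict.getD_of_mem_items _ hmem (by rw [hkeys]; exact hnd)]
  rw [hG]
  exact pv_slice_scan uniq doc w hw hne

-- B's port returns the deduplicated words, each with its column of counts
theorem td_alt_items (descriptions : List String) (words : List String) :
    td_alt descriptions words = (PySem.List.dedup words).map (fun w =>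
      (w, descriptions.map (fun doc => (PySem.Str.count doc w : Int)))) := by
  have hnd := PySem.List.nodup_dedup words
  show (descriptions.foldl (fun res doc =>
      (PySem.List.dedup words).foldl (fun r w =>
        r.modify w [] (fun l => l ++ [if w = "" then PySem.Str.len doc + 1
          else ((pvS (PySem.List.dedup words) doc).getD w (0, 0)).1])) res)
    ((PySem.List.dedup words).foldl (fun d w => d.insert w ([] : List Int))
      PySem.Dict.empty)).items = _
  have hinit : (PySem.List.dedup words).foldl (fun d w => d.insert w ([] : List Int))
      PySem.Dict.empty
      = PySem.Dict.mk ((PySem.List.dedup words).map (fun x => (x, ([] : List Int)))) := by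
    apply PySem.Dict.ext
    rw [PySem.Dict.items_foldl_insert_fresh (k := fun w => w) _ _ _
        (by intro a _; rfl) (by simp)]
    simp [PySem.Dict.empty]
  rw [hinit, outer_pass (PySem.List.dedup words) hnd
      (fun doc w => if w = "" then PySem.Str.len doc + 1
        else ((pvS (PySem.List.dedup words) doc).getD w (0, 0)).1) descriptions
      (fun _ => ([] : List Int))]
  show (PySem.List.dedup words).map _ = _
  apply List.map_congr_left
  intro x hx
  rw [List.nil_append]
  congr 1
  apply List.map_congr_left
  intro doc _
  by_cases hxe : x = ""
  · subst hxe
    rw [if_pos rfl, PySem.Str.count_eq]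
    show PySem.Str.len doc + 1 = _
    rw [PySem.Str.len_eq]
    simp [PySem.Chars.count]
  · rw [if_neg hxe]
    exact pvS_getD (PySem.List.dedup words) hnd doc x hx hxe

-- A's port returns the deduplicated words, each with its column of counts
theorem td_items (descriptions : List String) (words : List String) :
    td descriptions words = (PySem.List.dedup words).map (fun w =>
      (w, descriptions.map (fun doc => (PySem.Str.count doc w : Int)))) := by
  unfold td
  set F : String → List Int :=
    fun w => descriptions.map (fun doc => (PySem.Str.count doc w : Int)) with hF
  have hbody : ∀ (d : PySem.Dict String (List Int)), ∀ word ∈ words,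
      (fun td_words word =>
        td_words.insert word
          (descriptions.foldl (fun td_word doc => td_word ++ [(PySem.Str.count doc word : Int)]) []))
        d word = d.insert word (F word) := by
    intro d word _
    rw [hF]
    show d.insert word _ = _
    rw [PySem.List.foldl_append_singleton_eq_map, List.nil_append]
  rw [PySem.List.foldl_congr_mem words _ (fun d w => d.insert w (F w)) PySem.Dict.empty hbody]
  have h0 := foldl_insert_fun F words [] List.nodup_nil
  simpa only [PySem.Set.update, ← PySem.Set.ofList_eq_foldl, ← PySem.List.dedup_eq_ofList] using h0

-- ===== VERDICT (by name: the statement is the Claim_ definition above) =====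
theorem td_spec : Claim_equal_td := by
  intro descriptions words _
  show td descriptions words = td_alt descriptions words
  rw [td_items, td_alt_items]
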